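-- pv_equiv track=rewrite | github.com/HongDaeYong/codingStudy | Kayoung/0608/dfs-bfs03.py | makeChangableMap
-- ===== SOURCE A (Python) =====
-- def makeChangableMap(begin, words):
--     mapLen = len(words) + 1
--     changableMap = [[0 for _ in range(mapLen)] for _ in range(mapLen)]  # words + begin + target
--
--     for i in range(len(words)):
--         for j in range(len(words)):
--             if i == j:
--                 continue
--             if isChangable(words[i], words[j]):
--                 changableMap[i][j] = 1
--                 changableMap[j][i] = 1
--
--     for i in range(len(words)):
--         if isChangable(words[i], begin):
--             changableMap[mapLen - 1][i] = 1
--             changableMap[i][mapLen - 1] = 1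
--
--     return changableMap
--
-- def isChangable(str1, str2):
--     if str1 == str2:
--         return False
--     if len(str1) != len(str2):
--         return False
--     cnt = 0
--     for i in range(len(str1)):
--         if str1[i] == str2[i]:
--             cnt += 1
--     if cnt == len(str1) - 1:
--         return True
--     return False
-- ===== SOURCE B (Python) =====
-- def makeChangableMap(begin, words):
--     # Bucket indices of words+[begin] by "one-hole" patterns (prefix, suffix):
--     # two words are one-change-apart iff they share a bucket and differ.
--     allw = list(words) + [begin]
--     n = len(allw)
--     pairs = [((w[:i], w[i + 1:]), idx)
--              for idx, w in enumerate(allw)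
--              for i in range(len(w))]
--     buckets = {}
--     for key, idx in pairs:
--         buckets.setdefault(key, []).append(idx)
--     m = [[0] * n for _ in range(n)]
--     for group in buckets.values():
--         for x in range(len(group)):
--             for y in range(x + 1, len(group)):
--                 ia, ib = group[x], group[y]
--                 if allw[ia] != allw[ib]:
--                     m[ia][ib] = 1
--                     m[ib][ia] = 1
--     return m
-- ===== Notes on version B (the rewrite author's own statement) =====
-- stated objective: faster
-- what changed: B replaces A's all-pairs isChangable scan by hashing every index of words+[begin] into one-hole pattern buckets keyed by (prefix, suffix) and connecting only indices that share a bucket and carry different words, instead of testing every pair character by character.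
import Mathlib
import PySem

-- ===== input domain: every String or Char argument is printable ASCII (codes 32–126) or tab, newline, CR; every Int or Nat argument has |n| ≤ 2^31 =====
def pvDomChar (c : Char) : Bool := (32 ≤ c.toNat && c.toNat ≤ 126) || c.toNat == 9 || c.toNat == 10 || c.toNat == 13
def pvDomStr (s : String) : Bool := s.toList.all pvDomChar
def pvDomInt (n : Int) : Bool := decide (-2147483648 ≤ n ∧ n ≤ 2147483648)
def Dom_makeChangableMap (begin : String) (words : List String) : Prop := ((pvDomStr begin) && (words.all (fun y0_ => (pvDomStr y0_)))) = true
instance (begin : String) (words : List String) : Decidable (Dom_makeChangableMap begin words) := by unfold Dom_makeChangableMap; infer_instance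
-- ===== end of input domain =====

-- B replaces A's all-pairs character-by-character scan by hashing each index of
-- words ++ [begin] into one-hole pattern buckets (prefix, suffix) in a dict and
-- connecting only indices that share a bucket and carry different words.

-- ===== PORT A =====
-- helper isChangable, transliterated: equality guard, length guard, count of equal positions
def isChangable (str1 str2 : String) : Bool :=
  if str1 = str2 then false
  else if str1.toList.length ≠ str2.toList.length then false
  else
    -- cnt: for i in range(len(str1)): if str1[i] == str2[i]: cnt += 1
    -- (i < len(str1) = len(str2) throughout, so getD's default is never used)
    let cnt : Int := (List.range str1.toList.length).foldl
      (fun cnt i => if str1.toList.getD i ' ' = str2.toList.getD i ' ' then cnt + 1 else cnt) 0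
    if cnt = (str1.toList.length : Int) - 1 then true else false

-- changableMap[i][j] = v  (both indices are in range at every call site of either port)
def set2 (m : List (List Int)) (i j : Nat) (v : Int) : List (List Int) :=
  m.modify i (fun row => row.set j v)

def makeChangableMap (begin : String) (words : List String) : List (List Int) :=
  let mapLen := words.length + 1
  let m0 := List.replicate mapLen (List.replicate mapLen (0 : Int))
  -- first double loop: edges between pairs of words
  let m1 := (List.range words.length).foldl (fun m i =>
    (List.range words.length).foldl (fun m j =>
      if i = j then m
      else if isChangable (words.getD i "") (words.getD j "") then
        set2 (set2 m i j 1) j i 1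
      else m) m) m0
  -- second loop: edges between each word and begin (row/column mapLen - 1)
  (List.range words.length).foldl (fun m i =>
    if isChangable (words.getD i "") begin then
      set2 (set2 m (mapLen - 1) i 1) i (mapLen - 1) 1
    else m) m1

-- ===== PORT B =====
-- pairs = [((w[:i], w[i+1:]), idx) for idx in range(len(allw)) for i in range(len(w))]
-- (slices with 0 ≤ i < len(w) are exactly take/drop; keys kept as List Char pairs)
def patternPairs (allw : List String) : List ((List Char × List Char) × Nat) :=
  (List.range allw.length).flatMap (fun idx =>
    (List.range (allw.getD idx "").toList.length).map (fun i =>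
      (((allw.getD idx "").toList.take i, (allw.getD idx "").toList.drop (i + 1)), idx)))

-- for key, idx in pairs: buckets.setdefault(key, []).append(idx)
-- (content-identical to buckets[key] = buckets.get(key, []) + [idx], i.e. Dict.modify)
def buildBuckets (allw : List String) : PySem.Dict (List Char × List Char) (List Nat) :=
  (patternPairs allw).foldl (fun d p => d.modify p.1 [] (fun v => v ++ [p.2])) PySem.Dict.empty

-- for x in range(len(group)): for y in range(x+1, len(group)): connect group[x], group[y]
def connectGroup (allw : List String) (m : List (List Int)) (g : List Nat) : List (List Int) :=
  (List.range g.length).foldl (fun m x =>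
    (List.range' (x + 1) (g.length - (x + 1))).foldl (fun m y =>
      if allw.getD (g.getD x 0) "" ≠ allw.getD (g.getD y 0) "" then
        set2 (set2 m (g.getD x 0) (g.getD y 0) 1) (g.getD y 0) (g.getD x 0) 1
      else m) m) m

def makeChangableMap_alt (begin : String) (words : List String) : List (List Int) :=
  let allw := words ++ [begin]
  let n := allw.length
  let m0 := List.replicate n (List.replicate n (0 : Int))
  ((buildBuckets allw).values).foldl (connectGroup allw) m0

-- ===== PRECONDITION & SPEC =====
def Spec_makeChangableMap (begin : String) (words : List String) (out : List (List Int)) : Prop := out = makeChangableMap_alt begin words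
instance (begin : String) (words : List String) (out : List (List Int)) : Decidable (Spec_makeChangableMap begin words out) := by unfold Spec_makeChangableMap; infer_instance

-- ===== CLAIM (what is proved, stated in full; the proofs are below) =====
def Claim_equal_makeChangableMap : Prop := ∀ (begin : String) (words : List String), Dom_makeChangableMap begin words → Spec_makeChangableMap begin words (makeChangableMap begin words)

-- ===== LEMMAS AND PROOFS =====

-- "u and v differ in exactly one position" (the shared predicate both ports realize)
def oneApart (u v : String) : Bool :=
  u.toList.length = v.toList.length &&
    (u.toList.zip v.toList).countP (fun p => p.1 ≠ p.2) = 1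

-- an N×N 0/1 matrix described pointwise by a boolean function
def matF (N : Nat) (f : Nat → Nat → Bool) : List (List Int) :=
  (List.range N).map (fun i => (List.range N).map (fun j => if f i j then 1 else 0))

theorem matF_congr {N : Nat} {f g : Nat → Nat → Bool}
    (h : ∀ a b, a < N → b < N → f a b = g a b) : matF N f = matF N g := by
  apply List.ext_getElem (by simp [matF])
  intro a h1 h2
  simp only [matF, List.getElem_map, List.getElem_range]
  apply List.ext_getElem (by simp)
  intro b hb1 hb2
  simp only [List.getElem_map, List.getElem_range]
  rw [h a b (by simpa [matF] using h1) (by simpa using hb1)]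

theorem set2_matF {N : Nat} (f : Nat → Nat → Bool) (i j : Nat)
    (_hi : i < N) (_hj : j < N) :
    set2 (matF N f) i j 1
      = matF N (fun a b => (decide (a = i ∧ b = j)) || f a b) := by
  unfold set2 matF
  apply List.ext_getElem (by simp)
  intro a h1 h2
  rw [List.getElem_modify]
  simp only [List.getElem_map, List.getElem_range]
  have ha : a < N := by simpa using h2
  by_cases hia : i = a
  · subst hia
    simp only [if_true]
    apply List.ext_getElem (by simp)
    intro b hb1 hb2
    have hbN : b < N := by simpa using hb2
    rw [List.getElem_set]
    simp only [List.getElem_map, List.getElem_range]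
    by_cases hjb : j = b
    · subst hjb; simp
    · have hne : ¬(b = j) := fun h => hjb h.symm
      simp only [hne, if_neg hjb]
      simp
  · simp only [if_neg hia]
    apply List.ext_getElem (by simp)
    intro b hb1 hb2
    simp only [List.getElem_map, List.getElem_range]
    have hne : ¬(a = i ∧ b = j) := fun h => hia h.1.symm
    simp [hne]

-- ===== A-side fold characterization =====

theorem inner_fold (c : Nat → Nat → Bool) (N i : Nat) (hi : i < N)
    (l : List Nat) (hl : ∀ x ∈ l, x < N) (f : Nat → Nat → Bool) :
    l.foldl (fun m j =>
      if i = j then m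
      else if c i j then set2 (set2 m i j 1) j i 1 else m) (matF N f)
    = matF N (fun a b => f a b
        || decide (a = i ∧ b ∈ l ∧ i ≠ b ∧ c i b = true)
        || decide (b = i ∧ a ∈ l ∧ i ≠ a ∧ c i a = true)) := by
  induction l generalizing f with
  | nil => simp only [List.foldl_nil]; apply matF_congr; intro a b _ _; simp
  | cons j l ih =>
    have hjN : j < N := hl j (by simp)
    have hl' : ∀ x ∈ l, x < N := fun x hx => hl x (by simp [hx])
    simp only [List.foldl_cons]
    by_cases hij : i = j
    · subst hij
      rw [if_pos rfl, ih hl' f]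
      apply matF_congr; intro a b _ _
      congr 1
      · congr 1
        apply decide_eq_decide.mpr
        constructor
        · rintro ⟨h1, h2, h3, h4⟩; exact ⟨h1, List.mem_cons_of_mem _ h2, h3, h4⟩
        · rintro ⟨h1, h2, h3, h4⟩
          rcases List.mem_cons.mp h2 with h | h
          · exact absurd h.symm h3
          · exact ⟨h1, h, h3, h4⟩
      · apply decide_eq_decide.mpr
        constructor
        · rintro ⟨h1, h2, h3, h4⟩; exact ⟨h1, List.mem_cons_of_mem _ h2, h3, h4⟩
        · rintro ⟨h1, h2, h3, h4⟩
          rcases List.mem_cons.mp h2 with h | h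
          · exact absurd h.symm h3
          · exact ⟨h1, h, h3, h4⟩
    · rw [if_neg hij]
      by_cases hc : c i j
      · rw [if_pos hc, set2_matF f i j hi hjN, set2_matF _ j i hjN hi, ih hl' _]
        apply matF_congr; intro a b _ _
        rw [Bool.eq_iff_iff]
        simp only [Bool.or_eq_true, decide_eq_true_eq, List.mem_cons]
        constructor
        · rintro (((⟨h1, h2⟩ | ⟨h1, h2⟩ | hf) | ⟨h1, h2, h3, h4⟩) | ⟨h1, h2, h3, h4⟩)
          · exact Or.inr ⟨h2, Or.inl h1, fun h => hij (h.trans h1), by rw [h1]; exact hc⟩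
          · exact Or.inl (Or.inr ⟨h1, Or.inl h2, fun h => hij (h.trans h2), by rw [h2]; exact hc⟩)
          · exact Or.inl (Or.inl hf)
          · exact Or.inl (Or.inr ⟨h1, Or.inr h2, h3, h4⟩)
          · exact Or.inr ⟨h1, Or.inr h2, h3, h4⟩
        · rintro ((hf | ⟨h1, (h2 | h2), h3, h4⟩) | ⟨h1, (h2 | h2), h3, h4⟩)
          · exact Or.inl (Or.inl (Or.inr (Or.inr hf)))
          · exact Or.inl (Or.inl (Or.inr (Or.inl ⟨h1, h2⟩)))
          · exact Or.inl (Or.inr ⟨h1, h2, h3, h4⟩)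
          · exact Or.inl (Or.inl (Or.inl ⟨h2, h1⟩))
          · exact Or.inr ⟨h1, h2, h3, h4⟩
      · rw [if_neg hc, ih hl' f]
        apply matF_congr; intro a b _ _
        congr 1
        · congr 1
          apply decide_eq_decide.mpr
          constructor
          · rintro ⟨h1, h2, h3, h4⟩; exact ⟨h1, List.mem_cons_of_mem _ h2, h3, h4⟩
          · rintro ⟨h1, h2, h3, h4⟩
            rcases List.mem_cons.mp h2 with h | h
            · exact absurd (h ▸ h4) hc
            · exact ⟨h1, h, h3, h4⟩
        · apply decide_eq_decide.mpr
          constructor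
          · rintro ⟨h1, h2, h3, h4⟩; exact ⟨h1, List.mem_cons_of_mem _ h2, h3, h4⟩
          · rintro ⟨h1, h2, h3, h4⟩
            rcases List.mem_cons.mp h2 with h | h
            · exact absurd (h ▸ h4) hc
            · exact ⟨h1, h, h3, h4⟩

theorem outer_fold (c : Nat → Nat → Bool) (N n : Nat) (hn : n ≤ N)
    (l : List Nat) (hl : ∀ x ∈ l, x < N) (f : Nat → Nat → Bool) :
    l.foldl (fun m i =>
      (List.range n).foldl (fun m j =>
        if i = j then m
        else if c i j then set2 (set2 m i j 1) j i 1 else m) m) (matF N f)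
    = matF N (fun a b => f a b
        || decide (a ∈ l ∧ b < n ∧ a ≠ b ∧ c a b = true)
        || decide (b ∈ l ∧ a < n ∧ b ≠ a ∧ c b a = true)) := by
  induction l generalizing f with
  | nil => simp only [List.foldl_nil]; apply matF_congr; intro a b _ _; simp
  | cons i0 l ih =>
    have hi0 : i0 < N := hl i0 (by simp)
    have hl' : ∀ x ∈ l, x < N := fun x hx => hl x (by simp [hx])
    simp only [List.foldl_cons]
    rw [inner_fold c N i0 hi0 (List.range n) (fun x hx => lt_of_lt_of_le (List.mem_range.mp hx) hn) f,
        ih hl' _]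
    apply matF_congr; intro a b _ _
    rw [Bool.eq_iff_iff]
    simp only [Bool.or_eq_true, decide_eq_true_eq, List.mem_cons, List.mem_range]
    constructor
    · rintro ((((hf | ⟨h1, h2, h3, h4⟩) | ⟨h1, h2, h3, h4⟩) | ⟨h1, h2, h3, h4⟩) | ⟨h1, h2, h3, h4⟩)
      · exact Or.inl (Or.inl hf)
      · exact Or.inl (Or.inr ⟨Or.inl h1, h2, fun h => h3 (h1 ▸ h.symm ▸ rfl), by rw [h1]; exact h4⟩)
      · exact Or.inr ⟨Or.inl h1, h2, fun h => h3 (h1 ▸ h.symm ▸ rfl), by rw [h1]; exact h4⟩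
      · exact Or.inl (Or.inr ⟨Or.inr h1, h2, h3, h4⟩)
      · exact Or.inr ⟨Or.inr h1, h2, h3, h4⟩
    · rintro ((hf | ⟨(h1 | h1), h2, h3, h4⟩) | ⟨(h1 | h1), h2, h3, h4⟩)
      · exact Or.inl (Or.inl (Or.inl (Or.inl hf)))
      · exact Or.inl (Or.inl (Or.inl (Or.inr ⟨h1, h2, by rw [← h1]; exact h3, by rw [← h1]; exact h4⟩)))
      · exact Or.inl (Or.inr ⟨h1, h2, h3, h4⟩)
      · exact Or.inl (Or.inl (Or.inr ⟨h1, h2, by rw [← h1]; exact h3, by rw [← h1]; exact h4⟩))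
      · exact Or.inr ⟨h1, h2, h3, h4⟩

theorem phase2_fold (cB : Nat → Bool) (N n : Nat) (hn : n < N)
    (l : List Nat) (hl : ∀ x ∈ l, x < n) (f : Nat → Nat → Bool) :
    l.foldl (fun m i =>
      if cB i then set2 (set2 m n i 1) i n 1 else m) (matF N f)
    = matF N (fun a b => f a b
        || decide (a = n ∧ b ∈ l ∧ cB b = true)
        || decide (b = n ∧ a ∈ l ∧ cB a = true)) := by
  induction l generalizing f with
  | nil => simp only [List.foldl_nil]; apply matF_congr; intro a b _ _; simp
  | cons i0 l ih =>
    have hi0 : i0 < N := lt_trans (hl i0 (by simp)) hn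
    have hl' : ∀ x ∈ l, x < n := fun x hx => hl x (by simp [hx])
    simp only [List.foldl_cons]
    by_cases hc : cB i0
    · rw [if_pos hc, set2_matF f n i0 hn hi0, set2_matF _ i0 n hi0 hn, ih hl' _]
      apply matF_congr; intro a b _ _
      rw [Bool.eq_iff_iff]
      simp only [Bool.or_eq_true, decide_eq_true_eq, List.mem_cons]
      constructor
      · rintro (((⟨h1, h2⟩ | ⟨h1, h2⟩ | hf) | ⟨h1, h2, h3⟩) | ⟨h1, h2, h3⟩)
        · exact Or.inr ⟨h2, Or.inl h1, by rw [h1]; exact hc⟩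
        · exact Or.inl (Or.inr ⟨h1, Or.inl h2, by rw [h2]; exact hc⟩)
        · exact Or.inl (Or.inl hf)
        · exact Or.inl (Or.inr ⟨h1, Or.inr h2, h3⟩)
        · exact Or.inr ⟨h1, Or.inr h2, h3⟩
      · rintro ((hf | ⟨h1, (h2 | h2), h3⟩) | ⟨h1, (h2 | h2), h3⟩)
        · exact Or.inl (Or.inl (Or.inr (Or.inr hf)))
        · exact Or.inl (Or.inl (Or.inr (Or.inl ⟨h1, h2⟩)))
        · exact Or.inl (Or.inr ⟨h1, h2, h3⟩)
        · exact Or.inl (Or.inl (Or.inl ⟨h2, h1⟩))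
        · exact Or.inr ⟨h1, h2, h3⟩
    · rw [if_neg hc, ih hl' f]
      apply matF_congr; intro a b _ _
      congr 1
      · congr 1
        apply decide_eq_decide.mpr
        constructor
        · rintro ⟨h1, h2, h3⟩; exact ⟨h1, List.mem_cons_of_mem _ h2, h3⟩
        · rintro ⟨h1, h2, h3⟩
          rcases List.mem_cons.mp h2 with h | h
          · exact absurd (h ▸ h3) hc
          · exact ⟨h1, h, h3⟩
      · apply decide_eq_decide.mpr
        constructor
        · rintro ⟨h1, h2, h3⟩; exact ⟨h1, List.mem_cons_of_mem _ h2, h3⟩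
        · rintro ⟨h1, h2, h3⟩
          rcases List.mem_cons.mp h2 with h | h
          · exact absurd (h ▸ h3) hc
          · exact ⟨h1, h, h3⟩

theorem countP_range_getD_eq_zip (u v : List Char) (h : u.length = v.length) :
    (List.range u.length).countP (fun i => u.getD i ' ' = v.getD i ' ')
      = (u.zip v).countP (fun p => p.1 = p.2) := by
  induction u generalizing v with
  | nil => simp
  | cons x u ih =>
    cases v with
    | nil => simp at h
    | cons y v =>
      simp only [List.length_cons, List.range_succ_eq_map, List.countP_cons, List.countP_map,
        List.zip_cons_cons, Function.comp_def, List.getD_cons_succ, List.getD_cons_zero]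
      rw [ih v (by simpa using h)]

theorem countP_ne_zip_eq_zero_iff (u v : List Char) (h : u.length = v.length) :
    (u.zip v).countP (fun p => p.1 ≠ p.2) = 0 ↔ u = v := by
  induction u generalizing v with
  | nil => cases v with | nil => simp | cons y v => simp at h
  | cons x u ih =>
    cases v with
    | nil => simp at h
    | cons y v =>
      simp only [List.zip_cons_cons, List.countP_cons]
      by_cases hxy : x = y
      · have hp : decide (x ≠ y) = false := by simp [hxy]
        rw [hp]
        simp only [Bool.false_eq_true, if_false, Nat.add_zero]
        rw [ih v (by simpa using h)]
        simp [hxy]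
      · simp [hxy]

theorem isChangable_eq_oneApart (u v : String) : isChangable u v = oneApart u v := by
  simp only [isChangable, oneApart]
  by_cases huv : u = v
  · subst huv
    rw [if_pos rfl]
    have h0 : (u.toList.zip u.toList).countP (fun p => p.1 ≠ p.2) = 0 :=
      (countP_ne_zip_eq_zero_iff u.toList u.toList rfl).mpr rfl
    simp only [decide_not] at h0
    simp [h0]
  · rw [if_neg huv]
    by_cases hlen : u.toList.length = v.toList.length
    · rw [if_neg (by simpa using hlen)]
      have hrw : (fun (cnt : Int) i => if u.toList.getD i ' ' = v.toList.getD i ' ' then cnt + 1 else cnt)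
          = fun (cnt : Int) i => if (fun i => decide (u.toList.getD i ' ' = v.toList.getD i ' ')) i = true then cnt + 1 else cnt := by
        funext cnt i; simp
      rw [hrw, PySem.List.foldl_count_if, countP_range_getD_eq_zip u.toList v.toList hlen]
      have hz : (u.toList.zip v.toList).length = u.toList.length := by
        simp [List.length_zip, hlen]
      have hsum := List.length_eq_countP_add_countP
        (fun p : Char × Char => decide (p.1 = p.2)) (l := u.toList.zip v.toList)
      have hcn : (u.toList.zip v.toList).countP
            (fun a => decide ¬((fun p : Char × Char => decide (p.1 = p.2)) a = true))
          = (u.toList.zip v.toList).countP (fun p => p.1 ≠ p.2) := by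
        congr 1; funext p; simp
      rw [hcn] at hsum
      rw [hz] at hsum
      have hne0 : (u.toList.zip v.toList).countP (fun p => p.1 ≠ p.2) ≠ 0 := by
        intro h0
        exact huv (String.toList_inj.mp ((countP_ne_zip_eq_zero_iff _ _ hlen).mp h0))
      rw [decide_eq_true hlen, Bool.true_and]
      by_cases hP : (0:Int) + ((u.toList.zip v.toList).countP (fun p => p.1 = p.2) : Int)
          = (u.toList.length : Int) - 1
      · rw [if_pos hP,
          decide_eq_true (show (u.toList.zip v.toList).countP (fun p => p.1 ≠ p.2) = 1 by omega)]
      · rw [if_neg hP,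
          decide_eq_false (show ¬ (u.toList.zip v.toList).countP (fun p => p.1 ≠ p.2) = 1 by omega)]
    · rw [if_pos (by simpa using hlen), decide_eq_false hlen, Bool.false_and]

-- the common pointwise description both ports are proved equal to
def tgt (begin : String) (words : List String) (a b : Nat) : Bool :=
  decide (¬ a = b ∧ oneApart ((words ++ [begin]).getD a "") ((words ++ [begin]).getD b "") = true)

theorem countP_ne_zip_comm (u v : List Char) :
    (v.zip u).countP (fun p => p.1 ≠ p.2) = (u.zip v).countP (fun p => p.1 ≠ p.2) := by
  rw [← List.zip_swap u v, List.countP_map]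
  congr 1
  funext p
  simp [Prod.swap, eq_comm]

theorem oneApart_symm (u v : String) : oneApart u v = oneApart v u := by
  simp only [oneApart]
  rw [Bool.eq_iff_iff]
  simp only [Bool.and_eq_true, decide_eq_true_eq]
  constructor
  · rintro ⟨h1, h2⟩
    exact ⟨h1.symm, by rw [countP_ne_zip_comm]; exact h2⟩
  · rintro ⟨h1, h2⟩
    exact ⟨h1.symm, by rw [← countP_ne_zip_comm]; exact h2⟩

theorem makeChangableMap_eq_matF (begin : String) (words : List String) :
    makeChangableMap begin words = matF (words.length + 1) (tgt begin words) := by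
  have hn : words.length ≤ words.length + 1 := Nat.le_succ _
  have hN : words.length < words.length + 1 := Nat.lt_succ_self _
  have hm0 : List.replicate (words.length + 1) (List.replicate (words.length + 1) (0 : Int))
      = matF (words.length + 1) (fun _ _ => false) := by
    simp [matF, List.map_const']
  simp only [makeChangableMap, Nat.add_sub_cancel, hm0]
  rw [outer_fold (fun i j => isChangable (words.getD i "") (words.getD j ""))
      (words.length + 1) words.length hn (List.range words.length)
      (fun x hx => lt_trans (List.mem_range.mp hx) hN) _]
  rw [phase2_fold (fun i => isChangable (words.getD i "") begin)
      (words.length + 1) words.length hN (List.range words.length)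
      (fun x hx => List.mem_range.mp hx) _]
  apply matF_congr
  intro a b ha hb
  have hgetn : (words ++ [begin]).getD words.length "" = begin := by
    rw [List.getD_append_right _ _ _ _ (le_refl _)]
    simp
  rw [Bool.eq_iff_iff]
  simp only [tgt, Bool.or_eq_true, Bool.false_or, decide_eq_true_eq, List.mem_range]
  constructor
  · rintro (((⟨h1, h2, h3, h4⟩ | ⟨h1, h2, h3, h4⟩) | ⟨h1, h2, h3⟩) | ⟨h1, h2, h3⟩)
    · refine ⟨h3, ?_⟩
      rw [List.getD_append _ _ _ _ h1, List.getD_append _ _ _ _ h2, ← isChangable_eq_oneApart]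
      exact h4
    · refine ⟨fun h => h3 h.symm, ?_⟩
      rw [List.getD_append _ _ _ _ h2, List.getD_append _ _ _ _ h1, oneApart_symm,
        ← isChangable_eq_oneApart]
      exact h4
    · refine ⟨by omega, ?_⟩
      rw [h1, hgetn, List.getD_append _ _ _ _ h2, oneApart_symm, ← isChangable_eq_oneApart]
      exact h3
    · refine ⟨by omega, ?_⟩
      rw [h1, hgetn, List.getD_append _ _ _ _ h2, ← isChangable_eq_oneApart]
      exact h3
  · rintro ⟨hab, ho⟩
    have ha' : a < words.length ∨ a = words.length := by omega
    have hb' : b < words.length ∨ b = words.length := by omega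
    rcases ha' with ha' | ha' <;> rcases hb' with hb' | hb'
    · refine Or.inl (Or.inl (Or.inl ⟨ha', hb', hab, ?_⟩))
      rw [isChangable_eq_oneApart, ← List.getD_append _ [begin] _ _ ha',
        ← List.getD_append _ [begin] _ _ hb']
      exact ho
    · subst hb'
      refine Or.inr ⟨rfl, ha', ?_⟩
      rw [isChangable_eq_oneApart, ← hgetn, ← List.getD_append _ [begin] _ _ ha']
      exact ho
    · subst ha'
      refine Or.inl (Or.inr ⟨rfl, hb', ?_⟩)
      rw [isChangable_eq_oneApart, oneApart_symm, ← hgetn, ← List.getD_append _ [begin] _ _ hb']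
      exact ho
    · exact absurd (ha'.trans hb'.symm) hab

-- ===== B-side fold characterization =====

-- the unordered index pairs a group's double loop visits
def groupPairs (g : List Nat) : List (Nat × Nat) :=
  (List.range g.length).flatMap (fun x =>
    (List.range' (x + 1) (g.length - (x + 1))).map (fun y => (g.getD x 0, g.getD y 0)))

-- the loop body, as a step over one index pair
def pstep (allw : List String) (m : List (List Int)) (p : Nat × Nat) : List (List Int) :=
  if allw.getD p.1 "" ≠ allw.getD p.2 "" then
    set2 (set2 m p.1 p.2 1) p.2 p.1 1
  else m

theorem mem_groupPairs (g : List Nat) (p : Nat × Nat) :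
    p ∈ groupPairs g ↔ ∃ x y, x < y ∧ y < g.length ∧ p = (g.getD x 0, g.getD y 0) := by
  simp only [groupPairs, List.mem_flatMap, List.mem_map, List.mem_range, List.mem_range'_1]
  constructor
  · rintro ⟨x, hx, y, ⟨hy1, hy2⟩, hp⟩
    exact ⟨x, y, by omega, by omega, hp.symm⟩
  · rintro ⟨x, y, hxy, hy, hp⟩
    exact ⟨x, by omega, y, ⟨by omega, by omega⟩, hp.symm⟩

-- one fold over a list of index pairs, setting both symmetric entries when the words differ
theorem pairsFold (allw : List String) (N : Nat) (L : List (Nat × Nat))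
    (hL : ∀ p ∈ L, p.1 < N ∧ p.2 < N) (f : Nat → Nat → Bool) :
    L.foldl (pstep allw) (matF N f)
    = matF N (fun a b => f a b
        || decide (∃ p ∈ L, allw.getD p.1 "" ≠ allw.getD p.2 "" ∧ (p = (a, b) ∨ p = (b, a)))) := by
  induction L generalizing f with
  | nil => simp only [List.foldl_nil]; apply matF_congr; intro a b _ _; simp
  | cons q L ih =>
    have hq := hL q (by simp)
    have hL' : ∀ p ∈ L, p.1 < N ∧ p.2 < N := fun p hp => hL p (by simp [hp])
    simp only [List.foldl_cons]
    by_cases hw : allw.getD q.1 "" = allw.getD q.2 ""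
    · rw [show pstep allw (matF N f) q = matF N f from by
        unfold pstep; rw [if_neg (not_not_intro hw)], ih hL' f]
      apply matF_congr; intro a b _ _
      congr 1
      apply decide_eq_decide.mpr
      constructor
      · rintro ⟨p, hp, hwp, hab⟩; exact ⟨p, List.mem_cons_of_mem _ hp, hwp, hab⟩
      · rintro ⟨p, hp, hwp, hab⟩
        rcases List.mem_cons.mp hp with h | h
        · exact absurd (h ▸ hwp) (not_not_intro hw)
        · exact ⟨p, h, hwp, hab⟩
    · rw [show pstep allw (matF N f) q = set2 (set2 (matF N f) q.1 q.2 1) q.2 q.1 1 from by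
        unfold pstep; rw [if_pos hw],
        set2_matF f q.1 q.2 hq.1 hq.2, set2_matF _ q.2 q.1 hq.2 hq.1, ih hL' _]
      apply matF_congr; intro a b _ _
      rw [Bool.eq_iff_iff]
      simp only [Bool.or_eq_true, decide_eq_true_eq, List.mem_cons]
      constructor
      · rintro ((⟨h1, h2⟩ | ⟨h1, h2⟩ | hf) | ⟨p, hp, hwp, hab⟩)
        · exact Or.inr ⟨q, Or.inl rfl, hw, Or.inr (Prod.ext h2.symm h1.symm)⟩
        · exact Or.inr ⟨q, Or.inl rfl, hw, Or.inl (Prod.ext h1.symm h2.symm)⟩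
        · exact Or.inl hf
        · exact Or.inr ⟨p, Or.inr hp, hwp, hab⟩
      · rintro (hf | ⟨p, (hp | hp), hwp, (hab | hab)⟩)
        · exact Or.inl (Or.inr (Or.inr hf))
        · subst hp
          exact Or.inl (Or.inr (Or.inl ⟨(congrArg Prod.fst hab).symm ▸ rfl,
            (congrArg Prod.snd hab).symm ▸ rfl⟩))
        · subst hp
          exact Or.inl (Or.inl ⟨(congrArg Prod.snd hab).symm ▸ rfl,
            (congrArg Prod.fst hab).symm ▸ rfl⟩)
        · exact Or.inr ⟨p, hp, hwp, Or.inl hab⟩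
        · exact Or.inr ⟨p, hp, hwp, Or.inr hab⟩

-- a group's double loop IS the fold over its pair list
theorem connectGroup_eq_pairsFold (allw : List String) (m : List (List Int)) (g : List Nat) :
    connectGroup allw m g = (groupPairs g).foldl (pstep allw) m := by
  simp only [groupPairs, List.foldl_flatMap, List.foldl_map, connectGroup, pstep]

-- the whole bucket phase IS the fold over the concatenation of all pair lists
theorem bucketPhase_eq_pairsFold (allw : List String) (m : List (List Int))
    (groups : List (List Nat)) :
    groups.foldl (connectGroup allw) m
      = (groups.flatMap groupPairs).foldl (pstep allw) m := by
  rw [List.foldl_flatMap]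
  have h : connectGroup allw = fun m g => (groupPairs g).foldl (pstep allw) m := by
    funext m g
    exact connectGroup_eq_pairsFold allw m g
  rw [h]

-- ===== bucket contents =====

theorem mem_patternPairs (allw : List String) (k : List Char × List Char) (idx : Nat) :
    (k, idx) ∈ patternPairs allw
      ↔ idx < allw.length ∧ ∃ i < (allw.getD idx "").toList.length,
          k = ((allw.getD idx "").toList.take i, (allw.getD idx "").toList.drop (i + 1)) := by
  simp only [patternPairs, List.mem_flatMap, List.mem_map, List.mem_range, Prod.mk.injEq]
  constructor
  · rintro ⟨j, hj, i, hi, hk, hidx⟩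
    subst hidx
    exact ⟨hj, i, hi, hk.symm⟩
  · rintro ⟨hidx, i, hi, hk⟩
    exact ⟨idx, hidx, i, hi, hk.symm, rfl⟩

theorem mem_bucket (allw : List String) (k : List Char × List Char) (idx : Nat) :
    idx ∈ (buildBuckets allw).getD k [] ↔ (k, idx) ∈ patternPairs allw := by
  unfold buildBuckets
  rw [PySem.Dict.getD_foldl_modify_append]
  simp only [PySem.Dict.getD_empty, List.nil_append, List.mem_map, List.mem_filter,
    beq_iff_eq]
  constructor
  · rintro ⟨p, ⟨hp, hk⟩, hidx⟩
    have : p = (k, idx) := Prod.ext hk hidx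
    exact this ▸ hp
  · intro h
    exact ⟨(k, idx), ⟨h, rfl⟩, rfl⟩

theorem nodup_keys_buildBuckets (allw : List String) : (buildBuckets allw).keys.Nodup := by
  unfold buildBuckets
  apply PySem.Dict.nodup_keys_foldl_modify_key
  simp

theorem mem_values_buildBuckets (allw : List String) (g : List Nat) :
    g ∈ (buildBuckets allw).values
      ↔ ∃ k, k ∈ (buildBuckets allw).keys ∧ g = (buildBuckets allw).getD k [] := by
  rw [PySem.Dict.values_eq_map_keys _ (nodup_keys_buildBuckets allw) []]
  simp only [List.mem_map]
  constructor
  · rintro ⟨k, hk, hg⟩; exact ⟨k, hk, hg.symm⟩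
  · rintro ⟨k, hk, hg⟩; exact ⟨k, hk, hg.symm⟩

theorem bucket_elem_lt (allw : List String) (g : List Nat)
    (hg : g ∈ (buildBuckets allw).values) : ∀ e ∈ g, e < allw.length := by
  intro e he
  obtain ⟨k, _, hgk⟩ := (mem_values_buildBuckets allw g).mp hg
  subst hgk
  exact ((mem_patternPairs allw k e).mp ((mem_bucket allw k e).mp he)).1

-- shared one-hole pattern + inequality ⇔ equal length with exactly one mismatch
theorem oneHole_iff (u v : List Char) (huv : u ≠ v) :
    (∃ i, i < u.length ∧ i < v.length ∧ u.take i = v.take i ∧ u.drop (i + 1) = v.drop (i + 1))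
    ↔ (u.length = v.length ∧ (u.zip v).countP (fun p => p.1 ≠ p.2) = 1) := by
  induction u generalizing v with
  | nil =>
    constructor
    · rintro ⟨i, hi, _, _, _⟩; simp at hi
    · rintro ⟨hlen, _⟩
      exact absurd (List.eq_nil_of_length_eq_zero (by simpa using hlen.symm)).symm huv
  | cons x u ih =>
    cases v with
    | nil =>
      constructor
      · rintro ⟨i, _, hi, _, _⟩; simp at hi
      · rintro ⟨hlen, _⟩; simp at hlen
    | cons y v =>
      by_cases hxy : x = y
      · subst hxy
        have huv' : u ≠ v := fun h => huv (by rw [h])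
        rw [show ((x :: u).zip (x :: v)).countP (fun p => p.1 ≠ p.2)
              = (u.zip v).countP (fun p => p.1 ≠ p.2) by simp [List.zip_cons_cons]]
        constructor
        · rintro ⟨i, hi1, hi2, htake, hdrop⟩
          cases i with
          | zero => exact absurd (by simpa using hdrop) huv'
          | succ i =>
            have h1 : u.take i = v.take i := by
              simpa using htake
            have h2 : u.drop (i + 1) = v.drop (i + 1) := by
              simpa using hdrop
            have := (ih v huv').mp ⟨i, by simpa using hi1, by simpa using hi2, h1, h2⟩
            exact ⟨by simpa using this.1, this.2⟩
        · rintro ⟨hlen, hcnt⟩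
          obtain ⟨i, hi1, hi2, htake, hdrop⟩ := (ih v huv').mpr ⟨by simpa using hlen, hcnt⟩
          exact ⟨i + 1, by simpa using hi1, by simpa using hi2,
            by simpa using htake, by simpa using hdrop⟩
      · constructor
        · rintro ⟨i, hi1, hi2, htake, hdrop⟩
          cases i with
          | zero =>
            have huv' : u = v := by simpa using hdrop
            subst huv'
            refine ⟨rfl, ?_⟩
            simp only [List.zip_cons_cons, List.countP_cons]
            rw [(countP_ne_zip_eq_zero_iff u u rfl).mpr rfl]
            simp [hxy]
          | succ i =>
            have : x = y := by
              have := congrArg (fun l => l.headI) htake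
              simpa using this
            exact absurd this hxy
        · rintro ⟨hlen, hcnt⟩
          simp only [List.zip_cons_cons, List.countP_cons, decide_eq_true_eq] at hcnt
          rw [if_pos (by simpa using hxy)] at hcnt
          have h0 : (u.zip v).countP (fun p => p.1 ≠ p.2) = 0 := by omega
          have huv' : u = v := (countP_ne_zip_eq_zero_iff u v (by simpa using hlen)).mp h0
          exact ⟨0, by simp, by simp, by simp, by simpa using huv'⟩

-- i = j when equal-length prefixes match
theorem take_eq_len {u v : List Char} {i j : Nat} (h : u.take i = v.take j)
    (hi : i < u.length) (hj : j < v.length) : i = j := by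
  have := congrArg List.length h
  simp only [List.length_take] at this
  omega

-- a and b share a bucket holding distinct words ⇔ tgt holds (for in-range a b)
theorem exists_pair_iff_tgt (begin : String) (words : List String) (a b : Nat)
    (ha : a < (words ++ [begin]).length) (hb : b < (words ++ [begin]).length) :
    (∃ p ∈ ((buildBuckets (words ++ [begin])).values).flatMap groupPairs,
        (words ++ [begin]).getD p.1 "" ≠ (words ++ [begin]).getD p.2 "" ∧
        (p = (a, b) ∨ p = (b, a)))
    ↔ (¬ a = b ∧ oneApart ((words ++ [begin]).getD a "") ((words ++ [begin]).getD b "") = true) := by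
  set allw := words ++ [begin] with hallw
  have key : ∀ x y : Nat, x < allw.length → y < allw.length →
      ((((∃ g ∈ (buildBuckets allw).values, x ∈ g ∧ y ∈ g) ∧ allw.getD x "" ≠ allw.getD y ""))
      ↔ (¬ x = y ∧ oneApart (allw.getD x "") (allw.getD y "") = true)) := by
    intro x y hx hy
    constructor
    · rintro ⟨⟨g, hg, hxg, hyg⟩, hne⟩
      obtain ⟨k, _, hgk⟩ := (mem_values_buildBuckets allw g).mp hg
      subst hgk
      obtain ⟨_, i, hi, hki⟩ := (mem_patternPairs allw k x).mp ((mem_bucket allw k x).mp hxg)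
      obtain ⟨_, j, hj, hkj⟩ := (mem_patternPairs allw k y).mp ((mem_bucket allw k y).mp hyg)
      have hk := hki.symm.trans hkj
      have htake := congrArg Prod.fst hk
      have hdrop := congrArg Prod.snd hk
      simp only at htake hdrop
      have hxy : ¬ x = y := fun h => hne (by rw [h])
      have hlist : (allw.getD x "").toList ≠ (allw.getD y "").toList :=
        fun h => hne (String.toList_inj.mp h)
      have hij : i = j := take_eq_len htake hi hj
      subst hij
      have := (oneHole_iff (allw.getD x "").toList (allw.getD y "").toList hlist).mp
        ⟨i, hi, hj, htake, hdrop⟩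
      exact ⟨hxy, by simp only [oneApart, Bool.and_eq_true, decide_eq_true_eq]; exact this⟩
    · rintro ⟨hxy, hone⟩
      simp only [oneApart, Bool.and_eq_true, decide_eq_true_eq] at hone
      have hne : allw.getD x "" ≠ allw.getD y "" := by
        intro h
        rw [h] at hone
        have := (countP_ne_zip_eq_zero_iff _ _ rfl).mpr
          (rfl : (allw.getD y "").toList = (allw.getD y "").toList)
        omega
      have hlist : (allw.getD x "").toList ≠ (allw.getD y "").toList :=
        fun h => hne (String.toList_inj.mp h)
      obtain ⟨i, hi1, hi2, htake, hdrop⟩ :=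
        (oneHole_iff (allw.getD x "").toList (allw.getD y "").toList hlist).mpr hone
      set k : List Char × List Char :=
        ((allw.getD x "").toList.take i, (allw.getD x "").toList.drop (i + 1)) with hkdef
      have hxk : x ∈ (buildBuckets allw).getD k [] :=
        (mem_bucket allw k x).mpr ((mem_patternPairs allw k x).mpr ⟨hx, i, hi1, rfl⟩)
      have hyk : y ∈ (buildBuckets allw).getD k [] :=
        (mem_bucket allw k y).mpr ((mem_patternPairs allw k y).mpr
          ⟨hy, i, hi2, by rw [hkdef, htake, hdrop]⟩)
      have hkey : k ∈ (buildBuckets allw).keys := by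
        by_contra hk
        have hcontains : (buildBuckets allw).contains k = false := by
          cases hc : (buildBuckets allw).contains k
          · rfl
          · exact absurd ((PySem.Dict.contains_iff_mem_keys (buildBuckets allw) k).mp hc) hk
        rw [PySem.Dict.getD_of_not_contains _ _ hcontains] at hxk
        simp at hxk
      exact ⟨⟨(buildBuckets allw).getD k [],
        (mem_values_buildBuckets allw _).mpr ⟨k, hkey, rfl⟩, hxk, hyk⟩, hne⟩
  constructor
  · rintro ⟨p, hp, hwd, hab⟩
    obtain ⟨g, hg, hpg⟩ := List.mem_flatMap.mp hp
    obtain ⟨x0, y0, hxy0, hy0, hpxy⟩ := (mem_groupPairs g p).mp hpg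
    have hmem1 : p.1 ∈ g := by
      rw [hpxy]
      show g.getD x0 0 ∈ g
      rw [List.getD_eq_getElem g 0 (show x0 < g.length by omega)]
      exact List.getElem_mem _
    have hmem2 : p.2 ∈ g := by
      rw [hpxy]
      show g.getD y0 0 ∈ g
      rw [List.getD_eq_getElem g 0 hy0]
      exact List.getElem_mem _
    rcases hab with hab | hab
    · have h1 : p.1 = a := congrArg Prod.fst hab
      have h2 : p.2 = b := congrArg Prod.snd hab
      exact (key a b ha hb).mp ⟨⟨g, hg, h1 ▸ hmem1, h2 ▸ hmem2⟩, h1 ▸ h2 ▸ hwd⟩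
    · have h1 : p.1 = b := congrArg Prod.fst hab
      have h2 : p.2 = a := congrArg Prod.snd hab
      have := (key b a hb ha).mp ⟨⟨g, hg, h1 ▸ hmem1, h2 ▸ hmem2⟩, h1 ▸ h2 ▸ hwd⟩
      exact ⟨fun h => this.1 h.symm, by rw [oneApart_symm]; exact this.2⟩
  · rintro ⟨hab, hone⟩
    obtain ⟨⟨g, hg, hag, hbg⟩, hne⟩ := (key a b ha hb).mpr ⟨hab, hone⟩
    obtain ⟨x0, hx0, hgx0⟩ := List.mem_iff_getElem.mp hag
    obtain ⟨y0, hy0, hgy0⟩ := List.mem_iff_getElem.mp hbg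
    have hx0y0 : x0 ≠ y0 := by
      intro h
      subst h
      exact hab (hgx0.symm.trans hgy0)
    rcases Nat.lt_or_ge x0 y0 with hlt | hge
    · refine ⟨(a, b), List.mem_flatMap.mpr ⟨g, hg, (mem_groupPairs g _).mpr
        ⟨x0, y0, hlt, hy0, ?_⟩⟩, hne, Or.inl rfl⟩
      rw [List.getD_eq_getElem g 0 hx0, List.getD_eq_getElem g 0 hy0, hgx0, hgy0]
    · have hlt : y0 < x0 := by omega
      refine ⟨(b, a), List.mem_flatMap.mpr ⟨g, hg, (mem_groupPairs g _).mpr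
        ⟨y0, x0, hlt, hx0, ?_⟩⟩, fun h => hne h.symm, Or.inr rfl⟩
      rw [List.getD_eq_getElem g 0 hx0, List.getD_eq_getElem g 0 hy0, hgy0, hgx0]

theorem makeChangableMap_alt_eq_matF (begin : String) (words : List String) :
    makeChangableMap_alt begin words = matF (words.length + 1) (tgt begin words) := by
  set allw := words ++ [begin] with hallw
  have hlen : allw.length = words.length + 1 := by simp [hallw]
  have hm0 : List.replicate allw.length (List.replicate allw.length (0 : Int))
      = matF allw.length (fun _ _ => false) := by
    simp [matF, List.map_const']
  have hL : ∀ p ∈ ((buildBuckets allw).values).flatMap groupPairs,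
      p.1 < allw.length ∧ p.2 < allw.length := by
    intro p hp
    obtain ⟨g, hg, hpg⟩ := List.mem_flatMap.mp hp
    obtain ⟨x0, y0, hxy, hy0, hpxy⟩ := (mem_groupPairs g p).mp hpg
    have h1 : p.1 ∈ g := by
      rw [hpxy]
      show g.getD x0 0 ∈ g
      rw [List.getD_eq_getElem g 0 (show x0 < g.length by omega)]
      exact List.getElem_mem _
    have h2 : p.2 ∈ g := by
      rw [hpxy]
      show g.getD y0 0 ∈ g
      rw [List.getD_eq_getElem g 0 hy0]
      exact List.getElem_mem _
    exact ⟨bucket_elem_lt allw g hg p.1 h1, bucket_elem_lt allw g hg p.2 h2⟩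
  show ((buildBuckets allw).values).foldl (connectGroup allw)
      (List.replicate allw.length (List.replicate allw.length (0 : Int)))
    = matF (words.length + 1) (tgt begin words)
  rw [bucketPhase_eq_pairsFold, hm0, pairsFold allw allw.length _ hL, ← hlen]
  apply matF_congr
  intro a b ha hb
  rw [Bool.eq_iff_iff]
  simp only [Bool.false_or, decide_eq_true_eq, tgt, ← hallw]
  exact exists_pair_iff_tgt begin words a b ha hb

-- ===== VERDICT (by name: the statement is the Claim_ definition above) =====
theorem makeChangableMap_spec : Claim_equal_makeChangableMap := by
  intro begin words _
  unfold Spec_makeChangableMap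
  rw [makeChangableMap_eq_matF, makeChangableMap_alt_eq_matF]
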